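-- pv_equiv track=rewrite | github.com/Puccimburu/Chatbot-III | conversational-analytics/backend/core/query_generation/query_validator.py | _can_optimize_aggregation
-- ===== SOURCE A (Python) =====
-- from typing import Dict, List, Any, Optional, Tuple
--
-- def _can_optimize_aggregation(pipeline: List[Dict]) -> bool:
--     """
--     Check if aggregation pipeline can be optimized
--     """
--     # Check if $match comes after $sort (should be before)
--     sort_index = -1
--     match_index = -1
--
--     for i, stage in enumerate(pipeline):
--         if "$sort" in stage and sort_index == -1:
--             sort_index = i
--         elif "$match" in stage:
--             match_index = i
--
--     return match_index > sort_index and sort_index != -1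
-- ===== SOURCE B (Python) =====
-- def _can_optimize_aggregation(pipeline):
--     # Scan back-to-front: as soon as a $sort stage has some $match strictly after it,
--     # the pipeline is optimizable (any such sort implies the first one has one too).
--     match_seen_later = False
--     for stage in reversed(pipeline):
--         if "$sort" in stage and match_seen_later:
--             return True
--         if "$match" in stage:
--             match_seen_later = True
--     return False
-- ===== Notes on version B (the rewrite author's own statement) =====
-- stated objective: alternative
-- what changed: B scans the pipeline back-to-front with a single 'match seen later' flag and returns True at the first $sort stage that has some $match after it, instead of A's forward enumerate loop that tracks a first-sort index and a last-match index and compares them at the end.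
import Mathlib
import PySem

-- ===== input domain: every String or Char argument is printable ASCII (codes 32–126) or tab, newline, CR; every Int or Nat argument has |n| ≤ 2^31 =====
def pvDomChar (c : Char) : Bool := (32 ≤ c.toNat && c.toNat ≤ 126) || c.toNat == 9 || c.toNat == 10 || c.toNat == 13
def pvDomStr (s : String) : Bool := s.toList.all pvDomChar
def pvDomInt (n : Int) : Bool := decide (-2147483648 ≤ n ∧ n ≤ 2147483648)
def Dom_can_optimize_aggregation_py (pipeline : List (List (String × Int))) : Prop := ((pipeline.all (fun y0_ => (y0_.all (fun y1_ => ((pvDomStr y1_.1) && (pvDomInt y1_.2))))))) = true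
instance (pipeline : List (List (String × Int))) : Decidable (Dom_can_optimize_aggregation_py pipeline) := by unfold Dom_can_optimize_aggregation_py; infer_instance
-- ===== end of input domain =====

-- B scans the pipeline back-to-front with a 'match seen later' flag instead of A's
-- forward index-tracking loop (objective: alternative; same O(n) cost).

-- ===== PORT A =====
-- "$sort" in stage / "$match" in stage: dict-key membership (shared by both ports)
def pvHasKey (k : String) (stage : List (String × Int)) : Bool :=
  stage.any (fun kv => kv.1 == k)

-- the 'for i, stage in enumerate(pipeline)' loop with state (sort_index, match_index)
def pvALoop : List (List (String × Int)) → Nat → Int × Int → Int × Int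
  | [], _, st => st
  | stage :: rest, i, st =>
      pvALoop rest (i + 1)
        (if pvHasKey "$sort" stage && st.1 == -1 then ((i : Int), st.2)
         else if pvHasKey "$match" stage then (st.1, (i : Int))
         else st)

def can_optimize_aggregation_py (pipeline : List (List (String × Int))) : Bool :=
  let st := pvALoop pipeline 0 (-1, -1)
  st.2 > st.1 && st.1 != -1

-- ===== PORT B =====
-- the 'for stage in reversed(pipeline)' loop with the match_seen_later flag and early return
def pvBLoop : List (List (String × Int)) → Bool → Bool
  | [], _ => false
  | stage :: rest, seen =>
      if pvHasKey "$sort" stage && seen then true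
      else pvBLoop rest (seen || pvHasKey "$match" stage)

def can_optimize_aggregation_py_alt (pipeline : List (List (String × Int))) : Bool :=
  pvBLoop pipeline.reverse false

-- ===== PRECONDITION & SPEC =====
def Spec_can_optimize_aggregation_py (pipeline : List (List (String × Int))) (out : Bool) : Prop := out = can_optimize_aggregation_py_alt pipeline
instance (pipeline : List (List (String × Int))) (out : Bool) : Decidable (Spec_can_optimize_aggregation_py pipeline out) := by unfold Spec_can_optimize_aggregation_py; infer_instance

-- ===== CLAIM (what is proved, stated in full; the proofs are below) =====
def Claim_equal_can_optimize_aggregation_py : Prop := ∀ (pipeline : List (List (String × Int))), Dom_can_optimize_aggregation_py pipeline → Spec_can_optimize_aggregation_py pipeline (can_optimize_aggregation_py pipeline)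

-- ===== LEMMAS AND PROOFS =====

-- Proof-side middle form: first $sort located, then any $match in the strict tail.
def pvStaged (pipeline : List (List (String × Int))) : Bool :=
  match pipeline.findIdx? (fun stage => pvHasKey "$sort" stage) with
  | none => false
  | some i => (pipeline.drop (i + 1)).any (fun stage => pvHasKey "$match" stage)

-- Over a stretch with no $sort stage, the loop never changes sort_index, and
-- match_index stays below n + length if it started below it.
theorem pvALoop_noSort (l : List (List (String × Int))) (n : Nat) (si mi : Int)
    (h : ∀ s ∈ l, pvHasKey "$sort" s = false) :
    (pvALoop l n (si, mi)).1 = si ∧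
      (mi < (n : Int) + l.length → (pvALoop l n (si, mi)).2 < (n : Int) + l.length) := by
  induction l generalizing n mi with
  | nil => exact ⟨rfl, by simpa using id⟩
  | cons s rest ih =>
    have hs : pvHasKey "$sort" s = false := h s (by simp)
    have hrest : ∀ t ∈ rest, pvHasKey "$sort" t = false := fun t ht => h t (by simp [ht])
    simp only [pvALoop, hs, Bool.false_and, Bool.false_eq_true, if_false]
    by_cases hm : pvHasKey "$match" s = true
    · simp only [hm, if_true]
      have := ih (n + 1) (n : Int) hrest
      constructor
      · exact this.1
      · intro _
        have h2 := this.2 (by push_cast; omega)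
        simp only [List.length_cons]
        push_cast at h2 ⊢; omega
    · simp only [Bool.not_eq_true] at hm
      simp only [hm, Bool.false_eq_true, if_false]
      have := ih (n + 1) mi hrest
      constructor
      · exact this.1
      · intro hlt
        have h2 := this.2 (by simp only [List.length_cons] at hlt; push_cast at hlt ⊢; omega)
        simp only [List.length_cons]
        push_cast at h2 ⊢; omega

-- Once sort_index is set (≠ -1), it never changes; match_index stays put if no
-- $match appears, and becomes ≥ n if one does.
theorem pvALoop_tail (l : List (List (String × Int))) (n : Nat) (si mi : Int)
    (hsi : si ≠ -1) :
    (pvALoop l n (si, mi)).1 = si ∧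
      (l.any (fun s => pvHasKey "$match" s) = false → (pvALoop l n (si, mi)).2 = mi) ∧
      (l.any (fun s => pvHasKey "$match" s) = true → (n : Int) ≤ (pvALoop l n (si, mi)).2) := by
  induction l generalizing n mi with
  | nil => exact ⟨rfl, fun _ => rfl, by simp⟩
  | cons s rest ih =>
    have hne : (si == (-1 : Int)) = false := by simpa using hsi
    simp only [pvALoop, hne, Bool.and_false, Bool.false_eq_true, if_false]
    by_cases hm : pvHasKey "$match" s = true
    · simp only [hm, if_true]
      have := ih (n + 1) (n : Int)
      refine ⟨this.1, ?_, ?_⟩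
      · intro hno; simp [hm] at hno
      · intro _
        rcases Bool.eq_false_or_eq_true (rest.any (fun s => pvHasKey "$match" s)) with hT | hF
        · have := this.2.2 hT; push_cast at this ⊢; omega
        · rw [this.2.1 hF]
    · simp only [Bool.not_eq_true] at hm
      simp only [hm, Bool.false_eq_true, if_false]
      have := ih (n + 1) mi
      refine ⟨this.1, ?_, ?_⟩
      · intro hno
        simp only [List.any_cons, hm, Bool.false_or] at hno
        exact this.2.1 hno
      · intro hyes
        simp only [List.any_cons, hm, Bool.false_or] at hyes
        have := this.2.2 hyes; push_cast at this ⊢; omega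

-- Splitting A's loop across an append.
theorem pvALoop_append (l₁ l₂ : List (List (String × Int))) (n : Nat) (st : Int × Int) :
    pvALoop (l₁ ++ l₂) n st = pvALoop l₂ (n + l₁.length) (pvALoop l₁ n st) := by
  induction l₁ generalizing n st with
  | nil => simp [pvALoop]
  | cons s rest ih =>
    simp only [List.cons_append, pvALoop, ih, List.length_cons]
    ring_nf

-- A equals the staged middle form.
theorem pvA_eq_staged (pipeline : List (List (String × Int))) :
    can_optimize_aggregation_py pipeline = pvStaged pipeline := by
  unfold can_optimize_aggregation_py pvStaged
  rcases hfi : pipeline.findIdx? (fun stage => pvHasKey "$sort" stage) with _ | i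
  · -- no $sort stage anywhere: sort_index stays -1, A returns false
    have hnone : ∀ s ∈ pipeline, pvHasKey "$sort" s = false := by
      intro s hs
      have := List.findIdx?_eq_none_iff.mp hfi s hs
      simpa using this
    have h1 := (pvALoop_noSort pipeline 0 (-1) (-1) hnone).1
    simp [h1]
  · -- first $sort at index i: decompose the pipeline around it
    obtain ⟨hi, hpi, hbefore⟩ := List.findIdx?_eq_some_iff_getElem.mp hfi
    have hsplit : pipeline = pipeline.take i ++ pipeline[i] :: pipeline.drop (i + 1) := by
      conv_lhs => rw [← List.take_append_drop i pipeline]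
      congr 1
      exact List.drop_eq_getElem_cons hi
    have hlen : (pipeline.take i).length = i := List.length_take_of_le (le_of_lt hi)
    have hpre : ∀ s ∈ pipeline.take i, pvHasKey "$sort" s = false := by
      intro s hs
      obtain ⟨j, hj, hjs⟩ := List.mem_iff_getElem.mp hs
      have hj' : j < i := by simpa [hlen] using hj
      have := hbefore j hj'
      simp only [List.getElem_take] at hjs
      rw [← hjs]; simpa using this
    have hA := pvALoop_noSort (pipeline.take i) 0 (-1) (-1) hpre
    rcases hst : pvALoop (pipeline.take i) 0 (-1, -1) with ⟨si₀, mi₀⟩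
    have hsi₀ : si₀ = -1 := by rw [hst] at hA; exact hA.1
    have hmi₀ : mi₀ < (i : Int) := by
      have := hA.2 (by simp [hlen]; omega)
      rw [hst] at this; simpa [hlen] using this
    -- run the loop over the decomposition
    have hloop : pvALoop pipeline 0 (-1, -1)
        = pvALoop (pipeline.drop (i + 1)) (i + 1) ((i : Int), mi₀) := by
      conv_lhs => rw [hsplit]
      rw [pvALoop_append, hst, hlen]
      simp only [Nat.zero_add, pvALoop, hsi₀, hpi, Bool.true_and, beq_self_eq_true, if_true]
    rw [hloop]
    have hT := pvALoop_tail (pipeline.drop (i + 1)) (i + 1) (i : Int) mi₀ (by omega)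
    rcases Bool.eq_false_or_eq_true ((pipeline.drop (i + 1)).any (fun s => pvHasKey "$match" s)) with hyes | hno
    · -- some $match after the first $sort: A's final match_index ≥ i+1 > i
      have h1 := hT.1
      have h2 := hT.2.2 hyes
      rcases hr : pvALoop (pipeline.drop (i + 1)) (i + 1) ((i : Int), mi₀) with ⟨sf, mf⟩
      rw [hr] at h1 h2
      simp only at h1 h2
      subst h1
      push_cast at h2
      simp only [hyes, gt_iff_lt]
      simp only [Bool.and_eq_true, decide_eq_true_eq, bne_iff_ne, ne_eq]
      refine ⟨by omega, by omega⟩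
    · -- no $match after the first $sort: match_index stays mi₀ < i
      have h1 := hT.1
      have h2 := hT.2.1 hno
      rcases hr : pvALoop (pipeline.drop (i + 1)) (i + 1) ((i : Int), mi₀) with ⟨sf, mf⟩
      rw [hr] at h1 h2
      simp only at h1 h2
      subst h1 h2
      simp only [hno, gt_iff_lt]
      simp only [Bool.and_eq_false_iff, decide_eq_false_iff_not, not_lt]
      left
      omega

-- Splitting B's loop across an append: after a prefix that did not return, the
-- flag has absorbed exactly the prefix's $match stages.
theorem pvBLoop_append (r r' : List (List (String × Int))) (seen : Bool) :
    pvBLoop (r ++ r') seen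
      = (pvBLoop r seen || pvBLoop r' (seen || r.any (fun s => pvHasKey "$match" s))) := by
  induction r generalizing seen with
  | nil => simp [pvBLoop]
  | cons s rest ih =>
    simp only [List.cons_append, pvBLoop, List.any_cons]
    by_cases hs : (pvHasKey "$sort" s && seen) = true
    · simp [hs]
    · simp only [hs, Bool.false_eq_true, if_false, ih]
      congr 2
      cases seen <;> cases pvHasKey "$match" s <;> simp
-- Note: 'congr 2' matches the two disjuncts; the flag arguments agree up to ‖-assoc/comm.

-- If the staged form returns true there is a $match somewhere in the list.
theorem pvStaged_any_match (l : List (List (String × Int))) (h : pvStaged l = true) :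
    l.any (fun s => pvHasKey "$match" s) = true := by
  unfold pvStaged at h
  rcases hfi : l.findIdx? (fun stage => pvHasKey "$sort" stage) with _ | i
  · rw [hfi] at h; simp at h
  · rw [hfi] at h
    simp only [List.any_eq_true] at h ⊢
    obtain ⟨s, hs, hm⟩ := h
    exact ⟨s, List.mem_of_mem_drop hs, hm⟩

-- The first $sort index in a cons.
theorem pvStaged_cons (s : List (String × Int)) (rest : List (List (String × Int))) :
    pvStaged (s :: rest)
      = (if pvHasKey "$sort" s then rest.any (fun t => pvHasKey "$match" t) else pvStaged rest) := by
  unfold pvStaged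
  by_cases hs : pvHasKey "$sort" s = true
  · rw [List.findIdx?_cons]
    simp [hs]
  · rw [List.findIdx?_cons]
    simp only [hs, Bool.false_eq_true, if_false]
    rcases hfi : rest.findIdx? (fun stage => pvHasKey "$sort" stage) with _ | i
    · simp
    · simp [List.drop_succ_cons]

-- B equals the staged middle form.
theorem pvB_eq_staged (pipeline : List (List (String × Int))) :
    can_optimize_aggregation_py_alt pipeline = pvStaged pipeline := by
  unfold can_optimize_aggregation_py_alt
  induction pipeline with
  | nil => simp [pvBLoop, pvStaged]
  | cons s rest ih =>
    rw [List.reverse_cons, pvBLoop_append, ih, pvStaged_cons]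
    simp only [pvBLoop, Bool.false_or, List.any_reverse]
    by_cases hs : pvHasKey "$sort" s = true
    · simp only [hs, if_true, Bool.true_and]
      rcases Bool.eq_false_or_eq_true (pvStaged rest) with hT | hF
      · rw [hT, pvStaged_any_match rest hT]; simp
      · rw [hF]
        simp [List.any_eq]
    · simp only [Bool.not_eq_true] at hs
      simp [hs]

-- ===== VERDICT (by name: the statement is the Claim_ definition above) =====
theorem can_optimize_aggregation_py_spec : Claim_equal_can_optimize_aggregation_py := by
  intro pipeline _
  unfold Spec_can_optimize_aggregation_py
  rw [pvA_eq_staged, pvB_eq_staged]
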